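-- pv_equiv track=rewrite | github.com/ephrem-ketachew/data-structure-and-algorithms | count-subarray-II---two-pointers.py | incremovableSubarrayCount
-- ===== SOURCE A (Python) =====
-- from typing import List
-- from bisect import bisect_right
--
-- def incremovableSubarrayCount(nums: List[int]) -> int:
--     count, n = 0, len(nums)
--     left, right = 0, n - 1
--     for i in range(1, n):
--         if nums[i] <= nums[i - 1]:
--             break
--         left = i
--
--     for i in range(n - 2, -1, -1):
--         if nums[i] >= nums[i + 1]:
--             break
--         right = i
--
--     arr = nums[right:]
--     if left >= right:
--         return n * (n + 1) // 2
--
--     count += len(arr) + 1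
--     for i in range(left + 1):
--         index = bisect_right(arr, nums[i])
--         count += len(arr) - index + 1
--
--     return count
-- ===== SOURCE B (Python) =====
-- def incremovableSubarrayCount(nums):
--     n = len(nums)
--     left = 0
--     while left + 1 < n and nums[left] < nums[left + 1]:
--         left += 1
--     if left >= n - 1:
--         return n * (n + 1) // 2
--     right = n - 1
--     while right > 0 and nums[right - 1] < nums[right]:
--         right -= 1
--     count = n - right + 1
--     j = right
--     for i in range(left + 1):
--         while j < n and nums[j] <= nums[i]:
--             j += 1
--         count += n - j + 1
--     return count
-- ===== Notes on version B (the rewrite author's own statement) =====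
-- stated objective: alternative
-- what changed: Replaces the per-prefix-element bisect_right binary search over the suffix with a single monotone two-pointer sweep, and decides the fully-increasing case from the prefix pointer alone without computing the suffix pointer.
import Mathlib
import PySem

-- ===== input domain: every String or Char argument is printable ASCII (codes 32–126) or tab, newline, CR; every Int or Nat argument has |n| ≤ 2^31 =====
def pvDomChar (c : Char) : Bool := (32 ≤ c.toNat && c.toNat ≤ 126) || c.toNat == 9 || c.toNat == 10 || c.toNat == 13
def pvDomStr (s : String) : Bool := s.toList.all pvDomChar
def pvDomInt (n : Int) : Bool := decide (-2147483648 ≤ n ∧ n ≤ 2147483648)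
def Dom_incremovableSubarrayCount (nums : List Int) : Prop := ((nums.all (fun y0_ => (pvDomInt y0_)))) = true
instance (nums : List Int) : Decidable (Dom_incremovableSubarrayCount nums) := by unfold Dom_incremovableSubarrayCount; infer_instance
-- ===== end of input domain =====

-- B replaces A's per-element bisect_right binary searches over the suffix by one
-- monotone two-pointer sweep (a different algorithm; return values are equal).


-- ===== PORT A =====
-- 'for i in range(1, n): if nums[i] <= nums[i-1]: break; left = i' (i in range, all accesses in range, so getD is exact)
def pvA_leftLoop (nums : List Int) (i left : Nat) : Nat :=
  if i < nums.length then
    if nums.getD i 0 ≤ nums.getD (i - 1) 0 then left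
    else pvA_leftLoop nums (i + 1) i
  else left
termination_by nums.length - i
decreasing_by omega

-- 'for i in range(n-2, -1, -1): if nums[i] >= nums[i+1]: break; right = i'; k = i+1 counts down
def pvA_rightLoop (nums : List Int) (k : Nat) (right : Int) : Int :=
  match k with
  | 0 => right
  | r + 1 =>
    if nums.getD (r + 1) 0 ≤ nums.getD r 0 then right
    else pvA_rightLoop nums r (r : Int)

-- bisect.bisect_right(arr, x): the stdlib binary search, transcribed
def pvBisectAux (arr : List Int) (x : Int) (lo hi : Nat) : Nat :=
  if lo < hi then
    let mid := (lo + hi) / 2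
    if x < arr.getD mid 0 then pvBisectAux arr x lo mid
    else pvBisectAux arr x (mid + 1) hi
  else lo
termination_by hi - lo
decreasing_by all_goals omega

def pvBisectRight (arr : List Int) (x : Int) : Nat :=
  pvBisectAux arr x 0 arr.length

def incremovableSubarrayCount (nums : List Int) : Int :=
  let n := nums.length
  let left := pvA_leftLoop nums 1 0
  let right := pvA_rightLoop nums (n - 1) ((n : Int) - 1)
  let arr := nums.drop right.toNat
  if right ≤ (left : Int) then (n : Int) * ((n : Int) + 1) / 2
  else
    let count : Int := (arr.length : Int) + 1
    (List.range (left + 1)).foldl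
      (fun c i => c + ((arr.length : Int) - (pvBisectRight arr (nums.getD i 0) : Int) + 1)) count

-- ===== PORT B =====
def pvB_leftLoop (nums : List Int) (left : Nat) : Nat :=
  if left + 1 < nums.length then
    if nums.getD left 0 < nums.getD (left + 1) 0 then pvB_leftLoop nums (left + 1)
    else left
  else left
termination_by nums.length - left
decreasing_by omega

def pvB_rightLoop (nums : List Int) (right : Nat) : Nat :=
  match right with
  | 0 => 0
  | r + 1 =>
    if nums.getD r 0 < nums.getD (r + 1) 0 then pvB_rightLoop nums r
    else r + 1

def pvB_jLoop (nums : List Int) (x : Int) (j : Nat) : Nat :=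
  if j < nums.length then
    if nums.getD j 0 ≤ x then pvB_jLoop nums x (j + 1)
    else j
  else j
termination_by nums.length - j
decreasing_by omega

def incremovableSubarrayCount_alt (nums : List Int) : Int :=
  let n := nums.length
  let left := pvB_leftLoop nums 0
  if (n : Int) - 1 ≤ (left : Int) then (n : Int) * ((n : Int) + 1) / 2
  else
    let right := pvB_rightLoop nums (n - 1)
    let res := (List.range (left + 1)).foldl
      (fun (cj : Int × Nat) i =>
        let j := pvB_jLoop nums (nums.getD i 0) cj.2
        (cj.1 + ((n : Int) - (j : Int) + 1), j))
      (((n : Int) - (right : Int) + 1, right) : Int × Nat)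
    res.1

-- ===== PRECONDITION & SPEC =====
def Spec_incremovableSubarrayCount (nums : List Int) (out : Int) : Prop := out = incremovableSubarrayCount_alt nums
instance (nums : List Int) (out : Int) : Decidable (Spec_incremovableSubarrayCount nums out) := by unfold Spec_incremovableSubarrayCount; infer_instance

-- ===== CLAIM (what is proved, stated in full; the proofs are below) =====
def Claim_equal_incremovableSubarrayCount : Prop := ∀ (nums : List Int), Dom_incremovableSubarrayCount nums → Spec_incremovableSubarrayCount nums (incremovableSubarrayCount nums)


-- ===== LEMMAS AND PROOFS =====

theorem pvGetD_drop (l : List Int) (R k : Nat) :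
    (l.drop R).getD k 0 = l.getD (R + k) 0 := by
  simp [List.getD_eq_getElem?_getD, List.getElem?_drop]

-- A's prefix loop and B's prefix loop compute the same `left`
theorem pv_left_eq_aux (nums : List Int) :
    ∀ fuel i, nums.length - i ≤ fuel → pvA_leftLoop nums (i + 1) i = pvB_leftLoop nums i := by
  intro fuel
  induction fuel with
  | zero =>
    intro i h
    rw [pvA_leftLoop, pvB_leftLoop]
    have h1 : ¬ (i + 1 < nums.length) := by omega
    simp [h1]
  | succ fuel ih =>
    intro i h
    rw [pvA_leftLoop, pvB_leftLoop]
    by_cases h1 : i + 1 < nums.length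
    · rw [if_pos h1, if_pos h1]
      have hsub : i + 1 - 1 = i := by omega
      rw [hsub]
      by_cases h2 : nums.getD (i + 1) 0 ≤ nums.getD i 0
      · rw [if_pos h2, if_neg (not_lt.mpr h2)]
      · rw [if_neg h2, if_pos (lt_of_not_ge h2)]
        exact ih (i + 1) (by omega)
    · rw [if_neg h1, if_neg h1]

theorem pv_left_eq (nums : List Int) : pvA_leftLoop nums 1 0 = pvB_leftLoop nums 0 :=
  pv_left_eq_aux nums nums.length 0 (by omega)

-- A's suffix loop and B's suffix loop compute the same `right`
theorem pv_right_eq (nums : List Int) :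
    ∀ r : Nat, pvA_rightLoop nums r (r : Int) = ((pvB_rightLoop nums r : Nat) : Int) := by
  intro r
  induction r with
  | zero => simp [pvA_rightLoop, pvB_rightLoop]
  | succ r ih =>
    rw [pvA_rightLoop, pvB_rightLoop]
    by_cases h : nums.getD (r + 1) 0 ≤ nums.getD r 0
    · rw [if_pos h, if_neg (not_lt.mpr h)]
    · rw [if_neg h, if_pos (lt_of_not_ge h)]
      exact ih

theorem pvB_leftLoop_stop (nums : List Int) :
    ∀ fuel i, nums.length - i ≤ fuel → pvB_leftLoop nums i + 1 < nums.length →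
      nums.getD (pvB_leftLoop nums i + 1) 0 ≤ nums.getD (pvB_leftLoop nums i) 0 := by
  intro fuel
  induction fuel with
  | zero =>
    intro i h hl
    rw [pvB_leftLoop] at hl ⊢
    have h1 : ¬ (i + 1 < nums.length) := by omega
    rw [if_neg h1] at hl ⊢
    omega
  | succ fuel ih =>
    intro i h hl
    rw [pvB_leftLoop] at hl ⊢
    by_cases h1 : i + 1 < nums.length
    · rw [if_pos h1] at hl ⊢
      by_cases h2 : nums.getD i 0 < nums.getD (i + 1) 0
      · rw [if_pos h2] at hl ⊢
        exact ih (i + 1) (by omega) hl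
      · rw [if_neg h2] at hl ⊢
        exact not_lt.mp h2
    · rw [if_neg h1] at hl ⊢
      omega

theorem pvB_leftLoop_chain (nums : List Int) :
    ∀ fuel i, nums.length - i ≤ fuel → ∀ k, i ≤ k → k < pvB_leftLoop nums i →
      nums.getD k 0 < nums.getD (k + 1) 0 := by
  intro fuel
  induction fuel with
  | zero =>
    intro i h k hik hk
    rw [pvB_leftLoop] at hk
    have h1 : ¬ (i + 1 < nums.length) := by omega
    rw [if_neg h1] at hk
    omega
  | succ fuel ih =>
    intro i h k hik hk
    rw [pvB_leftLoop] at hk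
    by_cases h1 : i + 1 < nums.length
    · rw [if_pos h1] at hk
      by_cases h2 : nums.getD i 0 < nums.getD (i + 1) 0
      · rw [if_pos h2] at hk
        rcases Nat.eq_or_lt_of_le hik with heq | hlt
        · rw [heq] at h2; exact h2
        · exact ih (i + 1) (by omega) k hlt hk
      · rw [if_neg h2] at hk; omega
    · rw [if_neg h1] at hk; omega

theorem pvB_rightLoop_le (nums : List Int) : ∀ r, pvB_rightLoop nums r ≤ r := by
  intro r
  induction r with
  | zero => simp [pvB_rightLoop]
  | succ r ih =>
    rw [pvB_rightLoop]
    by_cases h : nums.getD r 0 < nums.getD (r + 1) 0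
    · rw [if_pos h]; omega
    · rw [if_neg h]

theorem pvB_rightLoop_chain (nums : List Int) :
    ∀ r k, pvB_rightLoop nums r ≤ k → k < r → nums.getD k 0 < nums.getD (k + 1) 0 := by
  intro r
  induction r with
  | zero => intro k _ hk; omega
  | succ r ih =>
    intro k h1 h2
    rw [pvB_rightLoop] at h1
    by_cases h : nums.getD r 0 < nums.getD (r + 1) 0
    · rw [if_pos h] at h1
      rcases Nat.lt_or_ge k r with hlt | hge
      · exact ih k h1 hlt
      · have : k = r := by omega
        rw [this]; exact h
    · rw [if_neg h] at h1; omega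

theorem pvB_rightLoop_ge (nums : List Int) (l : Nat)
    (hstop : nums.getD (l + 1) 0 ≤ nums.getD l 0) :
    ∀ r, l + 1 ≤ r → l + 1 ≤ pvB_rightLoop nums r := by
  intro r
  induction r with
  | zero => intro h; omega
  | succ r ih =>
    intro h
    rw [pvB_rightLoop]
    by_cases hc : nums.getD r 0 < nums.getD (r + 1) 0
    · rw [if_pos hc]
      have hne : l + 1 ≠ r + 1 := by
        intro he
        have : l = r := by omega
        rw [this] at hstop; omega
      exact ih (by omega)
    · rw [if_neg hc]; omega

-- characterisation of B's inner two-pointer advance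
theorem pvB_jLoop_char (nums : List Int) (x : Int) :
    ∀ fuel j, nums.length - j ≤ fuel → j ≤ nums.length →
      j ≤ pvB_jLoop nums x j ∧ pvB_jLoop nums x j ≤ nums.length ∧
      (∀ k, j ≤ k → k < pvB_jLoop nums x j → nums.getD k 0 ≤ x) ∧
      (pvB_jLoop nums x j < nums.length → x < nums.getD (pvB_jLoop nums x j) 0) := by
  intro fuel
  induction fuel with
  | zero =>
    intro j h hj
    rw [pvB_jLoop]
    have h1 : ¬ (j < nums.length) := by omega
    rw [if_neg h1]
    exact ⟨le_refl j, hj, fun k h1 h2 => by omega, fun h2 => absurd h2 h1⟩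
  | succ fuel ih =>
    intro j h hj
    rw [pvB_jLoop]
    by_cases h1 : j < nums.length
    · rw [if_pos h1]
      by_cases h2 : nums.getD j 0 ≤ x
      · rw [if_pos h2]
        obtain ⟨c1, c2, c3, c4⟩ := ih (j + 1) (by omega) (by omega)
        refine ⟨by omega, c2, ?_, c4⟩
        intro k hk1 hk2
        rcases Nat.eq_or_lt_of_le hk1 with heq | hlt
        · rw [← heq]; exact h2
        · exact c3 k hlt hk2
      · rw [if_neg h2]
        exact ⟨le_refl j, hj, fun k hk1 hk2 => by omega, fun _ => lt_of_not_ge h2⟩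
    · rw [if_neg h1]
      exact ⟨le_refl j, hj, fun k hk1 hk2 => by omega, fun h2 => absurd h2 h1⟩

theorem pv_mono (f : Nat → Int) (m : Nat) (h : ∀ k, k + 1 < m → f k < f (k + 1)) :
    ∀ p q, p ≤ q → q < m → f p ≤ f q := by
  intro p q
  induction q with
  | zero =>
    intro hpq _
    have hp : p = 0 := by omega
    exact le_of_eq (congrArg f hp)
  | succ q ih =>
    intro hpq hq
    rcases Nat.eq_or_lt_of_le hpq with heq | hlt
    · rw [heq]
    · have h1 : f p ≤ f q := ih (by omega) (by omega)
      have h2 : f q < f (q + 1) := h q hq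
      omega

-- characterisation of Python's bisect_right on a sorted list
theorem pvBisectAux_char (arr : List Int) (x : Int)
    (hmono : ∀ p q, p ≤ q → q < arr.length → arr.getD p 0 ≤ arr.getD q 0) :
    ∀ fuel lo hi, hi - lo ≤ fuel → lo ≤ hi → hi ≤ arr.length →
      (∀ k, k < lo → arr.getD k 0 ≤ x) →
      (∀ k, hi ≤ k → k < arr.length → x < arr.getD k 0) →
      lo ≤ pvBisectAux arr x lo hi ∧ pvBisectAux arr x lo hi ≤ hi ∧
      (∀ k, k < pvBisectAux arr x lo hi → arr.getD k 0 ≤ x) ∧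
      (∀ k, pvBisectAux arr x lo hi ≤ k → k < arr.length → x < arr.getD k 0) := by
  intro fuel
  induction fuel with
  | zero =>
    intro lo hi h hlh hha hlow hhigh
    rw [pvBisectAux]
    have h1 : ¬ (lo < hi) := by omega
    rw [if_neg h1]
    exact ⟨le_refl lo, hlh, hlow, fun k hk1 hk2 => hhigh k (by omega) hk2⟩
  | succ fuel ih =>
    intro lo hi h hlh hha hlow hhigh
    rw [pvBisectAux]
    by_cases h1 : lo < hi
    · rw [if_pos h1]
      simp only []
      by_cases h2 : x < arr.getD ((lo + hi) / 2) 0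
      · rw [if_pos h2]
        have hnew : ∀ k, (lo + hi) / 2 ≤ k → k < arr.length → x < arr.getD k 0 := by
          intro k hk1 hk2
          exact lt_of_lt_of_le h2 (hmono _ k hk1 hk2)
        obtain ⟨c1, c2, c3, c4⟩ := ih lo ((lo + hi) / 2) (by omega) (by omega) (by omega) hlow hnew
        exact ⟨c1, by omega, c3, c4⟩
      · rw [if_neg h2]
        have hmid : arr.getD ((lo + hi) / 2) 0 ≤ x := not_lt.mp h2
        have hnew : ∀ k, k < (lo + hi) / 2 + 1 → arr.getD k 0 ≤ x := by
          intro k hk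
          exact le_trans (hmono k _ (by omega) (by omega)) hmid
        obtain ⟨c1, c2, c3, c4⟩ := ih ((lo + hi) / 2 + 1) hi (by omega) (by omega) hha hnew hhigh
        exact ⟨by omega, c2, c3, c4⟩
    · rw [if_neg h1]
      have : lo = hi := by omega
      exact ⟨le_refl lo, hlh, hlow, fun k hk1 hk2 => hhigh k (by omega) hk2⟩

-- uniqueness of the "first index > x" characterisation
theorem pv_uniq (g : Nat → Int) (x : Int) (R n r1 r2 : Nat)
    (ha1 : R ≤ r1) (ha2 : r1 ≤ n) (ha3 : ∀ k, R ≤ k → k < r1 → g k ≤ x) (ha4 : r1 < n → x < g r1)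
    (hb1 : R ≤ r2) (hb2 : r2 ≤ n) (hb3 : ∀ k, R ≤ k → k < r2 → g k ≤ x) (hb4 : r2 < n → x < g r2) :
    r1 = r2 := by
  by_contra hne
  rcases Nat.lt_or_ge r1 r2 with hlt | hge
  · have h1 := hb3 r1 ha1 hlt
    have h2 := ha4 (by omega)
    omega
  · have hlt : r2 < r1 := by omega
    have h1 := ha3 r2 hb1 hlt
    have h2 := hb4 (by omega)
    omega

-- the two-pointer fold of B equals the bisect fold of A, step by step
theorem pv_fold_eq (nums : List Int) (L R : Nat)
    (hRn : R ≤ nums.length)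
    (hpre : ∀ k, k < L → nums.getD k 0 < nums.getD (k + 1) 0)
    (hsuf : ∀ k, R ≤ k → k + 1 < nums.length → nums.getD k 0 < nums.getD (k + 1) 0) :
    ∀ t, t ≤ L + 1 →
      R ≤ ((List.range t).foldl
            (fun (cj : Int × Nat) i =>
              let j := pvB_jLoop nums (nums.getD i 0) cj.2
              (cj.1 + ((nums.length : Int) - (j : Int) + 1), j))
            (((nums.length : Int) - (R : Int) + 1, R))).2 ∧
      ((List.range t).foldl
            (fun (cj : Int × Nat) i =>
              let j := pvB_jLoop nums (nums.getD i 0) cj.2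
              (cj.1 + ((nums.length : Int) - (j : Int) + 1), j))
            (((nums.length : Int) - (R : Int) + 1, R))).2 ≤ nums.length ∧
      (∀ k, R ≤ k → k < ((List.range t).foldl
            (fun (cj : Int × Nat) i =>
              let j := pvB_jLoop nums (nums.getD i 0) cj.2
              (cj.1 + ((nums.length : Int) - (j : Int) + 1), j))
            (((nums.length : Int) - (R : Int) + 1, R))).2 →
        nums.getD k 0 ≤ nums.getD (t - 1) 0) ∧
      ((List.range t).foldl
            (fun (cj : Int × Nat) i =>
              let j := pvB_jLoop nums (nums.getD i 0) cj.2
              (cj.1 + ((nums.length : Int) - (j : Int) + 1), j))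
            (((nums.length : Int) - (R : Int) + 1, R))).1 =
        (List.range t).foldl
            (fun c i => c + (((nums.drop R).length : Int) -
              (pvBisectRight (nums.drop R) (nums.getD i 0) : Int) + 1))
            (((nums.drop R).length : Int) + 1) := by
  have hlen : (nums.drop R).length = nums.length - R := List.length_drop
  have hmono : ∀ p q, p ≤ q → q < (nums.drop R).length →
      (nums.drop R).getD p 0 ≤ (nums.drop R).getD q 0 := by
    apply pv_mono
    intro k hk
    rw [pvGetD_drop, pvGetD_drop]
    have : R + (k + 1) = (R + k) + 1 := by omega
    rw [this]
    exact hsuf (R + k) (by omega) (by omega)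
  intro t
  induction t with
  | zero =>
    intro _
    simp only [List.range_zero, List.foldl_nil]
    refine ⟨le_refl R, hRn, fun k h1 h2 => by omega, ?_⟩
    rw [hlen]
    omega
  | succ t ih =>
    intro ht
    obtain ⟨c1, c2, c3, c4⟩ := ih (by omega)
    rw [List.range_succ, List.foldl_append, List.foldl_append, List.foldl_cons,
      List.foldl_cons, List.foldl_nil, List.foldl_nil]
    simp only []
    set cj := ((List.range t).foldl
            (fun (cj : Int × Nat) i =>
              let j := pvB_jLoop nums (nums.getD i 0) cj.2
              (cj.1 + ((nums.length : Int) - (j : Int) + 1), j))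
            (((nums.length : Int) - (R : Int) + 1, R))) with hcj
    -- the value scanned at this step dominates everything already passed
    have hstep : nums.getD (t - 1) 0 ≤ nums.getD t 0 := by
      rcases t with _ | s
      · simp
      · exact le_of_lt (hpre s (by omega))
    have hpass : ∀ k, R ≤ k → k < cj.2 → nums.getD k 0 ≤ nums.getD t 0 :=
      fun k h1 h2 => le_trans (c3 k h1 h2) hstep
    obtain ⟨j1, j2, j3, j4⟩ :=
      pvB_jLoop_char nums (nums.getD t 0) nums.length cj.2 (by omega) c2
    -- A's bisect lands at the same frontier
    have hb := pvBisectAux_char (nums.drop R) (nums.getD t 0) hmono (nums.drop R).length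
      0 (nums.drop R).length (by omega) (by omega) (le_refl _)
      (fun k hk => by omega) (fun k hk1 hk2 => by omega)
    obtain ⟨b1, b2, b3, b4⟩ := hb
    have hbeq : pvB_jLoop nums (nums.getD t 0) cj.2 =
        R + pvBisectRight (nums.drop R) (nums.getD t 0) := by
      apply pv_uniq (fun k => nums.getD k 0) (nums.getD t 0) R nums.length
      · omega
      · exact j2
      · intro k hk1 hk2
        rcases Nat.lt_or_ge k cj.2 with hlt | hge
        · exact hpass k hk1 hlt
        · exact j3 k hge hk2
      · exact j4
      · omega
      · rw [pvBisectRight]; omega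
      · intro k hk1 hk2
        rw [pvBisectRight] at hk2
        have := b3 (k - R) (by omega)
        rw [pvGetD_drop] at this
        have hre : R + (k - R) = k := by omega
        rw [hre] at this
        exact this
      · intro hlt
        rw [pvBisectRight] at hlt ⊢
        have hblen : pvBisectAux (nums.drop R) (nums.getD t 0) 0 (nums.drop R).length <
            (nums.drop R).length := by omega
        have := b4 _ (le_refl _) hblen
        rw [pvGetD_drop] at this
        exact this
    refine ⟨by omega, by rw [hbeq, pvBisectRight]; omega, ?_, ?_⟩
    · intro k hk1 hk2
      simp only [Nat.add_sub_cancel]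
      rcases Nat.lt_or_ge k cj.2 with hlt | hge
      · exact hpass k hk1 hlt
      · exact j3 k hge hk2
    · rw [c4, hbeq]
      have hble : pvBisectRight (nums.drop R) (nums.getD t 0) ≤ (nums.drop R).length := by
        rw [pvBisectRight]; exact b2
    
      omega

-- the two ports agree
theorem pv_main (nums : List Int) :
    incremovableSubarrayCount nums = incremovableSubarrayCount_alt nums := by
  rcases Nat.eq_zero_or_pos nums.length with hn | hn
  · have : nums = [] := List.eq_nil_of_length_eq_zero hn
    rw [this]
    rfl
  · simp only [incremovableSubarrayCount, incremovableSubarrayCount_alt]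
    have hrA : pvA_rightLoop nums (nums.length - 1) ((nums.length : Int) - 1) =
        ((pvB_rightLoop nums (nums.length - 1) : Nat) : Int) := by
      have hc : ((nums.length : Int) - 1) = ((nums.length - 1 : Nat) : Int) := by omega
      rw [hc]
      exact pv_right_eq nums (nums.length - 1)
    rw [pv_left_eq, hrA]
    have hRle : pvB_rightLoop nums (nums.length - 1) ≤ nums.length - 1 :=
      pvB_rightLoop_le nums (nums.length - 1)
    by_cases hcond : (nums.length : Int) - 1 ≤ ((pvB_leftLoop nums 0 : Nat) : Int)
    · rw [if_pos (by omega), if_pos hcond]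
    · rw [if_neg hcond]
      have hLn : pvB_leftLoop nums 0 + 1 < nums.length := by omega
      have hstop := pvB_leftLoop_stop nums nums.length 0 (by omega) hLn
      have hRge := pvB_rightLoop_ge nums (pvB_leftLoop nums 0) hstop (nums.length - 1) (by omega)
      rw [if_neg (by omega)]
      have htn : ((pvB_rightLoop nums (nums.length - 1) : Nat) : Int).toNat =
          pvB_rightLoop nums (nums.length - 1) := Int.toNat_natCast _
      rw [htn]
      have hfold := pv_fold_eq nums (pvB_leftLoop nums 0) (pvB_rightLoop nums (nums.length - 1))
        (by omega)
        (fun k hk => pvB_leftLoop_chain nums nums.length 0 (by omega) k (Nat.zero_le k) hk)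
        (fun k h1 h2 => pvB_rightLoop_chain nums (nums.length - 1) k h1 (by omega))
        (pvB_leftLoop nums 0 + 1) (le_refl _)
      exact (hfold.2.2.2).symm

-- ===== VERDICT (by name: the statement is the Claim_ definition above) =====
theorem incremovableSubarrayCount_spec : Claim_equal_incremovableSubarrayCount := by
  intro nums _
  unfold Spec_incremovableSubarrayCount
  exact pv_main nums
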